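-- pv_equiv track=rewrite | github.com/FUJI1229/enshu3-3 | insert.py | insert_decryption_function
-- ===== SOURCE A (Python) =====
-- def insert_decryption_function(code, func_name):
--     NfdnxjaIryption_code = f'''
-- char* {func_name}(char* IEEedgTK, char* lxeXcSwQ) {{
--     int TVBWUqzw = 0;
--     while (IEEedgTK[TVBWUqzw] != '\\0') TVBWUqzw++;
--     char* NfdnxjaI = (char*)malloc(TVBWUqzw + 1);
--     for (int i = 0; i < TVBWUqzw; i++) {{
--         NfdnxjaI[i] = IEEedgTK[i] ^ lxeXcSwQ[i % strlen(lxeXcSwQ)];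
--     }}
--     NfdnxjaI[TVBWUqzw] = '\\0';
--     return NfdnxjaI;
-- }}
-- '''
--
--     lines = code.splitlines(keepends=True)
--
--     # 最後の#includeの
--     last_include_index = -1
--     for i, line in enumerate(lines):
--         if line.strip().startswith('#include'):
--             last_include_index = i
--
--     if last_include_index == -1:
--         return NfdnxjaIryption_code + '\n' + code
--
--     lines.insert(last_include_index + 1, NfdnxjaIryption_code + '\n')
--
--     return ''.join(lines)
-- ===== SOURCE B (Python) =====
-- def insert_decryption_function(code, func_name):
--     NfdnxjaIryption_code = f'''
-- char* {func_name}(char* IEEedgTK, char* lxeXcSwQ) {{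
--     int TVBWUqzw = 0;
--     while (IEEedgTK[TVBWUqzw] != '\\0') TVBWUqzw++;
--     char* NfdnxjaI = (char*)malloc(TVBWUqzw + 1);
--     for (int i = 0; i < TVBWUqzw; i++) {{
--         NfdnxjaI[i] = IEEedgTK[i] ^ lxeXcSwQ[i % strlen(lxeXcSwQ)];
--     }}
--     NfdnxjaI[TVBWUqzw] = '\\0';
--     return NfdnxjaI;
-- }}
-- '''
--
--     # single pass with two string accumulators: 'head' holds everything up to and
--     # including the last #include seen so far, 'tail' the text after it; on each
--     # #include line the tail is flushed into head.  No indices, no list surgery.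
--     found = False
--     head = ''
--     tail = ''
--     for line in code.splitlines(keepends=True):
--         if line.strip().startswith('#include'):
--             found = True
--             head += tail + line
--             tail = ''
--         else:
--             tail += line
--
--     if not found:
--         return NfdnxjaIryption_code + '\n' + code
--     return head + NfdnxjaIryption_code + '\n' + tail
-- ===== Notes on version B (the rewrite author's own statement) =====
-- stated objective: alternative
-- what changed: B replaces A's index bookkeeping (find last matching index, list.insert, join) by one pass over the lines with two string accumulators, flushing the tail into the head at every #include line and concatenating head + snippet + tail at the end; no indices, no list mutation.
import Mathlib
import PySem

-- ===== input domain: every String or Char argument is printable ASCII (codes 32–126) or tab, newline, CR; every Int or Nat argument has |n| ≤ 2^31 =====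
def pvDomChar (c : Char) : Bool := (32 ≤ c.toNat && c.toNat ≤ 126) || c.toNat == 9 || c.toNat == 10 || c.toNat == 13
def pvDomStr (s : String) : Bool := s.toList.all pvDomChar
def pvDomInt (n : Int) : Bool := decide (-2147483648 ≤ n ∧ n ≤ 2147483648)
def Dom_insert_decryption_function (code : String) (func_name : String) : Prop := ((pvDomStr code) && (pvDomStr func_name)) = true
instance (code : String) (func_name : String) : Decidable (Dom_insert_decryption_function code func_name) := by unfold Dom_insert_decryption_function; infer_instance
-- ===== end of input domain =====

-- B replaces A's index bookkeeping (find the last matching index, list.insert, join) by a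
-- single pass with two string accumulators flushed at every #include line (objective: alternative).

-- shared helpers: the f-string snippet and splitlines(keepends=True), called identically by both Pythons
def pvSnippet (func_name : String) : List Char :=
  "\nchar* ".toList ++ func_name.toList ++
  "(char* IEEedgTK, char* lxeXcSwQ) {\n    int TVBWUqzw = 0;\n    while (IEEedgTK[TVBWUqzw] != '\\0') TVBWUqzw++;\n    char* NfdnxjaI = (char*)malloc(TVBWUqzw + 1);\n    for (int i = 0; i < TVBWUqzw; i++) {\n        NfdnxjaI[i] = IEEedgTK[i] ^ lxeXcSwQ[i % strlen(lxeXcSwQ)];\n    }\n    NfdnxjaI[TVBWUqzw] = '\\0';\n    return NfdnxjaI;\n}\n".toList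

-- splitlines(keepends=True); exact on the Dom alphabet, whose only line breaks are '\n', '\r', '\r\n'
def pvSplitKeep (cs : List Char) : List (List Char) :=
  match cs with
  | [] => []
  | '\n' :: rest => ['\n'] :: pvSplitKeep rest
  | '\r' :: '\n' :: rest => ['\r', '\n'] :: pvSplitKeep rest
  | '\r' :: rest => ['\r'] :: pvSplitKeep rest
  | c :: rest =>
    match pvSplitKeep rest with
    | [] => [[c]]
    | l :: ls => (c :: l) :: ls

-- line.strip().startswith('#include')
def pvIsInclude (l : List Char) : Bool :=
  PySem.Chars.startswith (PySem.Chars.strip l) "#include".toList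

-- ===== PORT A =====
def insert_decryption_function (code : String) (func_name : String) : String :=
  let snippet := pvSnippet func_name
  let lines := pvSplitKeep code.toList
  let last_include_index : Int :=
    (PySem.List.enumerate lines).foldl
      (fun acc p => if pvIsInclude p.2 then p.1 else acc) (-1)
  if last_include_index = -1 then
    String.ofList (snippet ++ '\n' :: code.toList)
  else
    String.ofList (PySem.Chars.join []
      (PySem.List.insert lines (last_include_index + 1) (snippet ++ ['\n'])))

-- ===== PORT B =====
-- one pass: (found, head, tail); an #include line flushes tail ++ line into head
def insert_decryption_function_alt (code : String) (func_name : String) : String :=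
  let snippet := pvSnippet func_name
  let st := (pvSplitKeep code.toList).foldl
    (fun (st : Bool × List Char × List Char) line =>
      if pvIsInclude line then (true, st.2.1 ++ st.2.2 ++ line, [])
      else (st.1, st.2.1, st.2.2 ++ line)) (false, [], [])
  if st.1 = false then
    String.ofList (snippet ++ '\n' :: code.toList)
  else
    String.ofList (st.2.1 ++ snippet ++ '\n' :: st.2.2)

-- ===== PRECONDITION & SPEC =====
def Spec_insert_decryption_function (code : String) (func_name : String) (out : String) : Prop := out = insert_decryption_function_alt code func_name
instance (code : String) (func_name : String) (out : String) : Decidable (Spec_insert_decryption_function code func_name out) := by unfold Spec_insert_decryption_function; infer_instance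

-- ===== CLAIM (what is proved, stated in full; the proofs are below) =====
def Claim_equal_insert_decryption_function : Prop := ∀ (code : String) (func_name : String), Dom_insert_decryption_function code func_name → Spec_insert_decryption_function code func_name (insert_decryption_function code func_name)

-- ===== LEMMAS AND PROOFS =====

-- proof-only helper: index (from the end) of the last #include line, if any
def pvRevFind (ls : List (List Char)) : Option Nat :=
  match ls with
  | [] => none
  | l :: rest =>
    match pvRevFind rest with
    | some j => some (j + 1)
    | none => if pvIsInclude l then some 0 else none

-- A's forward last-index fold equals the pvRevFind index (shifted by the enumerate start)
theorem pvFold_eq_revFind (ls : List (List Char)) (s a : Int) :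
    (PySem.List.enumerate ls s).foldl (fun acc p => if pvIsInclude p.2 then p.1 else acc) a
      = match pvRevFind ls with
        | some j => s + (j : Int)
        | none => a := by
  induction ls generalizing s a with
  | nil => simp [PySem.List.enumerate_nil, pvRevFind]
  | cons l rest ih =>
    rw [PySem.List.enumerate_cons]
    simp only [List.foldl_cons, pvRevFind]
    rw [ih]
    cases h : pvRevFind rest with
    | some j => simp only []; push_cast; ring
    | none => by_cases hp : pvIsInclude l <;> simp [hp]

theorem pvRevFind_lt (ls : List (List Char)) (j : Nat) (h : pvRevFind ls = some j) :
    j < ls.length := by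
  induction ls generalizing j with
  | nil => simp [pvRevFind] at h
  | cons l rest ih =>
    simp only [pvRevFind] at h
    cases hr : pvRevFind rest with
    | some k =>
      rw [hr] at h
      have := ih k hr
      simp at h
      simp [← h]; omega
    | none =>
      rw [hr] at h
      by_cases hp : pvIsInclude l <;> simp [hp] at h
      simp [← h]

-- ''.join on a list of pieces is flatten
theorem pvJoin_nil_flatten (ls : List (List Char)) : PySem.Chars.join [] ls = ls.flatten := by
  induction ls with
  | nil => simp [PySem.Chars.join, List.intercalate]
  | cons l rest ih =>
    cases rest with
    | nil => simp [PySem.Chars.join, List.intercalate]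
    | cons m ms =>
      simp only [PySem.Chars.join, List.intercalate] at ih ⊢
      simp [List.intersperse, ih]

-- B's accumulator fold characterised through pvRevFind
theorem pvScan_eq (ls : List (List Char)) (b : Bool) (h t : List Char) :
    ls.foldl
      (fun (st : Bool × List Char × List Char) line =>
        if pvIsInclude line then (true, st.2.1 ++ st.2.2 ++ line, [])
        else (st.1, st.2.1, st.2.2 ++ line)) (b, h, t)
      = match pvRevFind ls with
        | some j => (true, h ++ t ++ (ls.take (j + 1)).flatten, (ls.drop (j + 1)).flatten)
        | none => (b, h, t ++ ls.flatten) := by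
  induction ls generalizing b h t with
  | nil => simp [pvRevFind]
  | cons l rest ih =>
    simp only [List.foldl_cons, pvRevFind]
    by_cases hp : pvIsInclude l <;>
      simp only [hp, if_true, if_false, Bool.false_eq_true] <;>
        rw [ih] <;>
          cases hr : pvRevFind rest <;>
            simp [hr, List.append_assoc]

theorem insert_decryption_function_spec : Claim_equal_insert_decryption_function := by
  intro code func_name _
  unfold Spec_insert_decryption_function insert_decryption_function insert_decryption_function_alt
  simp only []
  rw [pvFold_eq_revFind, pvScan_eq]
  cases h : pvRevFind (pvSplitKeep code.toList) with
  | none => simp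
  | some j =>
    have hj := pvRevFind_lt _ _ h
    have h1 : (0 : Int) + (j : Int) ≠ -1 := by omega
    simp only []
    rw [if_neg h1]
    have h2 : (0 : Int) + (j : Int) + 1 = ((j + 1 : Nat) : Int) := by push_cast; ring
    rw [h2, PySem.List.insert_natCast _ _ _ (by omega), pvJoin_nil_flatten]
    simp [List.append_assoc]
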